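-- pv_equiv track=rewrite | github.com/francomascareloai/EA_SCALPER | MCP_Integration/servers/code_analysis_mcp.py | _get_file_statistics
-- ===== SOURCE A (Python) =====
-- from typing import Dict, List, Optional, Any, Tuple, Set
--
-- def _get_file_statistics(content: str) -> Dict[str, int]:
--     """Obter estatísticas básicas do arquivo"""
--     lines = content.split('\n')
--
--     return {
--         "total_lines": len(lines),
--         "code_lines": len([l for l in lines if l.strip() and not l.strip().startswith('#')]),
--         "comment_lines": len([l for l in lines if l.strip().startswith('#')]),
--         "empty_lines": len([l for l in lines if not l.strip()]),
--         "characters": len(content)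
--     }
-- ===== SOURCE B (Python) =====
-- def _get_file_statistics(content: str) -> dict:
--     """Obter estatísticas básicas do arquivo"""
--     lines = content.split('\n')
--     code_lines = comment_lines = empty_lines = 0
--     for l in lines:
--         s = l.strip()
--         if not s:
--             empty_lines += 1
--         elif s.startswith('#'):
--             comment_lines += 1
--         else:
--             code_lines += 1
--     return {
--         "total_lines": len(lines),
--         "code_lines": code_lines,
--         "comment_lines": comment_lines,
--         "empty_lines": empty_lines,
--         "characters": len(content)
--     }
-- ===== Notes on version B (the rewrite author's own statement) =====
-- stated objective: simpler
-- what changed: Replaces A's four independent filter passes over the line list with one single-pass loop that classifies each stripped line as empty/comment/code and keeps three counters.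
import Mathlib
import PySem

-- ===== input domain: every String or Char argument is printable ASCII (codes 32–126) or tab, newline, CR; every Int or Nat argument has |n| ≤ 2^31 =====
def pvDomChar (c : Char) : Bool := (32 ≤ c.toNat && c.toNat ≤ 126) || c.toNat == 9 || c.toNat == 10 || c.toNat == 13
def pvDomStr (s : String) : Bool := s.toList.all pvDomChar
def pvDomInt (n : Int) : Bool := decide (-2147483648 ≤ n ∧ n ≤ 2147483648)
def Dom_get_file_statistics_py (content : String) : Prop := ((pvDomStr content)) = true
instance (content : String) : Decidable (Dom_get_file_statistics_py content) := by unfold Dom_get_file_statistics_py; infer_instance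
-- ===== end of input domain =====

-- B replaces A's four independent filter passes over the lines with one single-pass loop
-- keeping three counters (simpler decomposition; same O(n) cost).

-- ===== PORT A =====
-- four list comprehensions over lines, as in A
def get_file_statistics_py (content : String) : List (String × Int) :=
  let lines := (PySem.Str.split? content "\n").getD []
  [("total_lines", PySem.List.len lines),
   ("code_lines", PySem.List.len (lines.filter (fun l =>
      decide (PySem.Str.strip l ≠ "") && !PySem.Str.startswith (PySem.Str.strip l) "#"))),
   ("comment_lines", PySem.List.len (lines.filter (fun l =>
      PySem.Str.startswith (PySem.Str.strip l) "#"))),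
   ("empty_lines", PySem.List.len (lines.filter (fun l =>
      decide (PySem.Str.strip l = "")))),
   ("characters", PySem.Str.len content)]

-- ===== PORT B =====
-- one fold over the lines accumulating (code, comment, empty) counters
def pvClassify (acc : Int × Int × Int) (l : String) : Int × Int × Int :=
  let s := PySem.Str.strip l
  if s = "" then (acc.1, acc.2.1, acc.2.2 + 1)
  else if PySem.Str.startswith s "#" then (acc.1, acc.2.1 + 1, acc.2.2)
  else (acc.1 + 1, acc.2.1, acc.2.2)

def get_file_statistics_py_alt (content : String) : List (String × Int) :=
  let lines := (PySem.Str.split? content "\n").getD []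
  let r := lines.foldl pvClassify (0, 0, 0)
  [("total_lines", PySem.List.len lines),
   ("code_lines", r.1),
   ("comment_lines", r.2.1),
   ("empty_lines", r.2.2),
   ("characters", PySem.Str.len content)]

-- ===== PRECONDITION & SPEC =====
def Spec_get_file_statistics_py (content : String) (out : List (String × Int)) : Prop := out = get_file_statistics_py_alt content
instance (content : String) (out : List (String × Int)) : Decidable (Spec_get_file_statistics_py content out) := by unfold Spec_get_file_statistics_py; infer_instance

-- ===== CLAIM (what is proved, stated in full; the proofs are below) =====
def Claim_equal_get_file_statistics_py : Prop := ∀ (content : String), Dom_get_file_statistics_py content → Spec_get_file_statistics_py content (get_file_statistics_py content)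

-- ===== LEMMAS AND PROOFS =====

-- the fold computes exactly the three filter lengths of A, shifted by the accumulator
theorem pvFold_eq (lines : List String) : ∀ (a b c : Int),
    lines.foldl pvClassify (a, b, c) =
      (a + (lines.filter (fun l =>
              decide (PySem.Str.strip l ≠ "") && !PySem.Str.startswith (PySem.Str.strip l) "#")).length,
       b + (lines.filter (fun l => PySem.Str.startswith (PySem.Str.strip l) "#")).length,
       c + (lines.filter (fun l => decide (PySem.Str.strip l = ""))).length) := by
  induction lines with
  | nil => intro a b c; simp
  | cons l tl ih =>
    intro a b c
    by_cases hs : PySem.Str.strip l = ""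
    · have hsl : PySem.Chars.strip l.toList = [] := by
        have h := congrArg String.toList hs; simpa using h
      have hsw : PySem.Chars.startswith ([] : List Char) ['#'] = false := by rfl
      simp [pvClassify, hs, hsl, hsw, ih]
      omega
    · by_cases hc : PySem.Chars.startswith (PySem.Chars.strip l.toList) ['#'] = true
      · simp [pvClassify, hs, hc, ih]
        omega
      · simp at hc
        simp [pvClassify, hs, hc, ih]
        omega

-- ===== VERDICT (by name: the statement is the Claim_ definition above) =====
theorem get_file_statistics_py_spec : Claim_equal_get_file_statistics_py := by
  intro content _
  unfold Spec_get_file_statistics_py get_file_statistics_py get_file_statistics_py_alt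
  simp [pvFold_eq, PySem.List.len]
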